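-- pv_equiv track=rewrite | github.com/dalton-0x0/leetcode | easy/01_arrays/10_isValidSudoku.py | isValidGroup
-- ===== SOURCE A (Python) =====
-- def isValidGroup(group):
--     seen = set()
--     for cell in group:
--         if cell != '.':
--             if cell in seen:
--                 return False
--             seen.add(cell)
--     return True
-- ===== SOURCE B (Python) =====
-- def isValidGroup(group):
--     vals = sorted(c for c in group if c != '.')
--     return all(a != b for a, b in zip(vals, vals[1:]))
-- ===== Notes on version B (the rewrite author's own statement) =====
-- stated objective: alternative
-- what changed: Replaces the hash-set scan with early exit by sorting the non-dot cells and checking that no two adjacent sorted values are equal; duplicates become adjacent after sorting, so no set is used at all.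
import Mathlib
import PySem

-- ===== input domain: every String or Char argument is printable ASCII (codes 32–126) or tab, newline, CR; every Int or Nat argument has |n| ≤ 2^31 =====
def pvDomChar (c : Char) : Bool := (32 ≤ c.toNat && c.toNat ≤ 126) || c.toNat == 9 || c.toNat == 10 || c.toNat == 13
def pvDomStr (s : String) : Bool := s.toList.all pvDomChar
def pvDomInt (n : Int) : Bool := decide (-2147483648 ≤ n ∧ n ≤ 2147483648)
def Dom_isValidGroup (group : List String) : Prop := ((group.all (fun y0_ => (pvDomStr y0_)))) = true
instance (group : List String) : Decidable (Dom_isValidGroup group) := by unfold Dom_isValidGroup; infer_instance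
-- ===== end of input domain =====

-- B sorts the non-dot cells and checks that no two adjacent sorted values are
-- equal, instead of A's incremental scan against a growing set; same result.

-- ===== PORT A =====
def isValidGroupAux (group : List String) (seen : PySem.Set String) : Bool :=
  match group with
  | [] => true
  | cell :: rest =>
    if cell ≠ "." then
      if PySem.Set.contains seen cell then false
      else isValidGroupAux rest (PySem.Set.add seen cell)
    else isValidGroupAux rest seen

def isValidGroup (group : List String) : Bool :=
  isValidGroupAux group PySem.Set.empty

-- ===== PORT B =====
def isValidGroup_alt (group : List String) : Bool :=
  let vals := PySem.List.sorted (group.filter (fun c => c ≠ ".")) (fun x => x) false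
  (vals.zip (vals.drop 1)).all (fun p => p.1 != p.2)

-- ===== PRECONDITION & SPEC =====
def Spec_isValidGroup (group : List String) (out : Bool) : Prop := out = isValidGroup_alt group
instance (group : List String) (out : Bool) : Decidable (Spec_isValidGroup group out) := by unfold Spec_isValidGroup; infer_instance

-- ===== CLAIM (what is proved, stated in full; the proofs are below) =====
def Claim_equal_isValidGroup : Prop := ∀ (group : List String), Dom_isValidGroup group → Spec_isValidGroup group (isValidGroup group)

-- ===== LEMMAS AND PROOFS =====

-- A's aux returns true exactly when seen ++ (non-dot cells) has no duplicate.
theorem aux_spec (group : List String) : ∀ (seen : List String), seen.Nodup →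
    (isValidGroupAux group seen = true ↔ (seen ++ group.filter (fun c => c ≠ ".")).Nodup) := by
  induction group with
  | nil => intro seen h; simp [isValidGroupAux, h]
  | cons cell rest ih =>
    intro seen h
    by_cases hc : cell = "."
    · subst hc
      simp only [isValidGroupAux, ne_eq, not_true_eq_false, if_false]
      simpa using ih seen h
    · simp only [isValidGroupAux, ne_eq, hc, not_false_eq_true, if_true]
      by_cases hm : cell ∈ seen
      · rw [(PySem.Set.contains_iff seen cell).mpr hm]
        simp only [if_true]
        constructor
        · intro hfalse; cases hfalse
        · intro hn
          exfalso
          have hin : cell ∈ List.filter (fun c => decide ¬c = ".") (cell :: rest) := by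
            simp [hc]
          rw [List.nodup_append] at hn
          exact hn.2.2 cell hm cell hin rfl
      · have hcont : PySem.Set.contains seen cell = false := by
          by_contra hx
          exact hm ((PySem.Set.contains_iff seen cell).mp (by simpa using hx))
        rw [hcont]
        simp only [Bool.false_eq_true, if_false]
        rw [PySem.Set.add_of_not_mem hm]
        have hnodup : (seen ++ [cell]).Nodup := by
          simp [List.nodup_append, h]
          intro a ha he; exact hm (he ▸ ha)
        rw [ih (seen ++ [cell]) hnodup]
        have hassoc : seen ++ [cell] ++ List.filter (fun c => decide ¬c = ".") rest
            = seen ++ List.filter (fun c => decide ¬c = ".") (cell :: rest) := by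
          simp [hc, List.append_assoc]
        rw [hassoc]

-- the zip-with-tail scan is the adjacent-pairs chain
theorem zip_tail_all_iff_chain (l : List String) :
    ((l.zip (l.drop 1)).all (fun p => p.1 != p.2) = true) ↔ List.IsChain (· ≠ ·) l := by
  induction l with
  | nil => simp
  | cons a t ih =>
    cases t with
    | nil => simp
    | cons b t' =>
      simp only [List.drop_succ_cons, List.drop_zero, List.zip_cons_cons, List.all_cons,
        Bool.and_eq_true, bne_iff_ne, List.isChain_cons_cons] at *
      constructor
      · rintro ⟨h1, h2⟩; exact ⟨h1, ih.mp h2⟩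
      · rintro ⟨h1, h2⟩; exact ⟨h1, ih.mpr h2⟩

-- a ≠-chain that is also a ≤-chain is a <-chain
theorem chain_ne_le_lt (l : List String) (h1 : List.IsChain (· ≠ ·) l)
    (h2 : List.IsChain (fun a b => a ≤ b) l) : List.IsChain (· < ·) l := by
  induction l with
  | nil => simp
  | cons a t ih =>
    cases t with
    | nil => simp
    | cons b t' =>
      rw [List.isChain_cons_cons] at *
      exact ⟨lt_of_le_of_ne h2.1 h1.1, ih h1.2 h2.2⟩

-- a ≤-sorted list has no adjacent equals iff it has no duplicates at all
theorem chain_ne_iff_nodup_of_sorted (l : List String)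
    (hs : l.Pairwise (fun a b => a ≤ b)) : List.IsChain (· ≠ ·) l ↔ l.Nodup := by
  constructor
  · intro hc
    have hlt : List.IsChain (· < ·) l := chain_ne_le_lt l hc hs.isChain
    exact (hlt.pairwise).imp (fun h => ne_of_lt h)
  · intro hn
    exact hn.isChain

-- ===== VERDICT (by name: the statement is the Claim_ definition above) =====
theorem isValidGroup_spec : Claim_equal_isValidGroup := by
  intro group _
  unfold Spec_isValidGroup isValidGroup isValidGroup_alt
  simp only [PySem.Set.empty]
  have hA := aux_spec group PySem.Set.empty List.nodup_nil
  simp only [PySem.Set.empty, List.nil_append] at hA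
  set f := group.filter (fun c => c ≠ ".") with hf
  set vals := PySem.List.sorted f (fun x => x) false with hv
  have hperm : vals.Perm f := PySem.List.sorted_perm f (fun x => x) false
  have hpw : vals.Pairwise (fun a b => a ≤ b) := PySem.List.sorted_pairwise f (fun x => x)
  have hB := (zip_tail_all_iff_chain vals).trans
    ((chain_ne_iff_nodup_of_sorted vals hpw).trans hperm.nodup_iff)
  rcases hb : isValidGroupAux group [] with _ | _
  · have hnf : ¬ f.Nodup := fun hn => by rw [hA.mpr hn] at hb; cases hb
    symm
    rw [← Bool.not_eq_true]
    exact fun he => hnf (hB.mp he)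
  · symm
    exact hB.mpr (hA.mp hb)
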